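-- pv_equiv track=rewrite | github.com/britquokka/aoc | 2023/day18.py | to_vertices
-- ===== SOURCE A (Python) =====
-- def to_vertices(dig_plan):
--     y, x = 1, 1
--     vertices = [(y, x)]
--     p = 0
--     for direction, distance, _ in dig_plan:
--         d = int(distance)
--         p += d
--         if direction == 'R':
--             x += d
--         elif direction == 'D':
--             y += d
--         elif direction == 'L':
--             x -= d
--         elif direction == 'U':
--             y -= d
--         vertices.append((y, x))
--     return vertices, p
-- ===== SOURCE B (Python) =====
-- def to_vertices(dig_plan):
--     # pass 1: perimeter
--     p = sum(int(dist) for _, dist, _ in dig_plan)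
--     # pass 2: displacement vectors
--     deltas = {'R': (0, 1), 'D': (1, 0), 'L': (0, -1), 'U': (-1, 0)}
--     moves = []
--     for direction, dist, _ in dig_plan:
--         dy, dx = deltas.get(direction, (0, 0))
--         d = int(dist)
--         moves.append((dy * d, dx * d))
--     # pass 3: prefix-sum scan of the displacements from (1, 1)
--     vertices = [(1, 1)]
--     for dy, dx in moves:
--         y, x = vertices[-1]
--         vertices.append((y + dy, x + dx))
--     return vertices, p
-- ===== Notes on version B (the rewrite author's own statement) =====
-- stated objective: alternative
-- what changed: replaces A's single fused loop (if/elif branches mutating y,x,p and appending) by three separate passes: a perimeter sum, a delta-table map to displacement vectors, and a prefix-sum scan building the vertices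
import Mathlib
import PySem

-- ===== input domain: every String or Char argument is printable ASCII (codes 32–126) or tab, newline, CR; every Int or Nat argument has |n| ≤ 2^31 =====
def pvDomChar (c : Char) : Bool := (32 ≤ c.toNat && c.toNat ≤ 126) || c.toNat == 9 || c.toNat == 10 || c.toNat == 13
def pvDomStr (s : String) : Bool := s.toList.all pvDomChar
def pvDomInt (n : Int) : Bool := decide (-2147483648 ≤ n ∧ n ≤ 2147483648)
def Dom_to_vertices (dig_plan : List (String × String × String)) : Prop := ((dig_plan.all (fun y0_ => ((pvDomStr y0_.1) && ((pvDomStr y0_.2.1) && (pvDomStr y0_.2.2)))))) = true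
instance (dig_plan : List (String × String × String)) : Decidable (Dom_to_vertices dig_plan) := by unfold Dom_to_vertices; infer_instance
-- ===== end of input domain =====

-- B re-decomposes A's single fused loop into three passes (perimeter sum, delta-table map, prefix scan); return values agree wherever A returns.

-- ===== PORT A =====
-- fused loop: state (y, x, vertices, p); int(distance) modelled by ofStr?.getD 0 (inputs where it raises are outside Pre_)
def to_vertices (dig_plan : List (String × String × String)) : (List (Int × Int)) × Int :=
  let st := dig_plan.foldl
    (fun (st : Int × Int × List (Int × Int) × Int) t =>
      let y := st.1; let x := st.2.1; let vertices := st.2.2.1; let p := st.2.2.2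
      let d := (PySem.Int.ofStr? t.2.1).getD 0
      let p := p + d
      let yx : Int × Int :=
        if t.1 == "R" then (y, x + d)
        else if t.1 == "D" then (y + d, x)
        else if t.1 == "L" then (y, x - d)
        else if t.1 == "U" then (y - d, x)
        else (y, x)
      (yx.1, yx.2, vertices ++ [yx], p))
    (1, 1, [(1, 1)], 0)
  (st.2.2.1, st.2.2.2)

-- ===== PORT B =====
def pvDeltas : PySem.Dict String (Int × Int) :=
  PySem.Dict.ofList [("R", (0, 1)), ("D", (1, 0)), ("L", (0, -1)), ("U", (-1, 0))]

def to_vertices_alt (dig_plan : List (String × String × String)) : (List (Int × Int)) × Int :=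
  let p := (dig_plan.map (fun t => (PySem.Int.ofStr? t.2.1).getD 0)).sum
  let moves := dig_plan.map (fun t =>
    let dyx := PySem.Dict.getD pvDeltas t.1 (0, 0)
    let d := (PySem.Int.ofStr? t.2.1).getD 0
    (dyx.1 * d, dyx.2 * d))
  let vertices := moves.foldl
    (fun (vs : List (Int × Int)) m =>
      let last := (PySem.List.pyGet? vs (-1)).getD (0, 0)
      vs ++ [(last.1 + m.1, last.2 + m.2)])
    [(1, 1)]
  (vertices, p)

-- ===== PRECONDITION & SPEC =====
-- Pre_ excludes exactly the inputs where int(distance) raises ValueError in A (non-integer strings)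
def Pre_to_vertices (dig_plan : List (String × String × String)) : Prop :=
  (dig_plan.all (fun t => (PySem.Int.ofStr? t.2.1).isSome)) = true
instance (dig_plan : List (String × String × String)) : Decidable (Pre_to_vertices dig_plan) := by unfold Pre_to_vertices; infer_instance
def pvWitness_to_vertices : (List (String × String × String)) :=
  [("R", "6", "#70c710"), ("D", "5", "#0dc571"), ("Q", "2", "#5713f0")]
def Spec_to_vertices (dig_plan : List (String × String × String)) (out : (List (Int × Int)) × Int) : Prop := out = to_vertices_alt dig_plan
instance (dig_plan : List (String × String × String)) (out : (List (Int × Int)) × Int) : Decidable (Spec_to_vertices dig_plan out) := by unfold Spec_to_vertices; infer_instance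

-- ===== CLAIM (what is proved, stated in full; the proofs are below) =====
def Claim_equal_to_vertices : Prop := ∀ (dig_plan : List (String × String × String)), Dom_to_vertices dig_plan → Pre_to_vertices dig_plan → Spec_to_vertices dig_plan (to_vertices dig_plan)

-- ===== LEMMAS AND PROOFS =====

-- literal lookups in the delta table
theorem lookR : PySem.Dict.getD pvDeltas "R" (0, 0) = (0, 1) := by decide
theorem lookD : PySem.Dict.getD pvDeltas "D" (0, 0) = (1, 0) := by decide
theorem lookL : PySem.Dict.getD pvDeltas "L" (0, 0) = (0, -1) := by decide
theorem lookU : PySem.Dict.getD pvDeltas "U" (0, 0) = (-1, 0) := by decide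
theorem lookNone (dir : String) (hR : dir ≠ "R") (hD : dir ≠ "D") (hL : dir ≠ "L") (hU : dir ≠ "U") :
    PySem.Dict.getD pvDeltas dir (0, 0) = (0, 0) := by
  have hi : pvDeltas.items = [("R", ((0:Int), (1:Int))), ("D", (1, 0)), ("L", (0, -1)), ("U", (-1, 0))] := by decide
  have h1 : (("R":String) == dir) = false := by simp [Ne.symm hR]
  have h2 : (("D":String) == dir) = false := by simp [Ne.symm hD]
  have h3 : (("L":String) == dir) = false := by simp [Ne.symm hL]
  have h4 : (("U":String) == dir) = false := by simp [Ne.symm hU]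
  simp [PySem.Dict.getD, PySem.Dict.get?, hi, List.find?, h1, h2, h3, h4]

-- one step of A's position update equals adding the scaled delta
theorem step_delta (dir : String) (d y x : Int) :
    (if dir == "R" then (y, x + d)
     else if dir == "D" then (y + d, x)
     else if dir == "L" then (y, x - d)
     else if dir == "U" then (y - d, x)
     else (y, x) : Int × Int)
    = (y + (PySem.Dict.getD pvDeltas dir (0, 0)).1 * d,
       x + (PySem.Dict.getD pvDeltas dir (0, 0)).2 * d) := by
  by_cases hR : dir = "R"
  · subst hR; simp [lookR]
  · by_cases hD : dir = "D"
    · subst hD; simp [lookD]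
    · by_cases hL : dir = "L"
      · subst hL; simp [lookL]; ring
      · by_cases hU : dir = "U"
        · subst hU; simp [lookU]; ring
        · simp [lookNone dir hR hD hL hU, hR, hD, hL, hU]

-- final position of B's prefix scan, computed directly
def pvPos (moves : List (Int × Int)) (yx : Int × Int) : Int × Int :=
  moves.foldl (fun a m => (a.1 + m.1, a.2 + m.2)) yx

-- main invariant: A's fused fold from (y, x, vs ++ [(y,x)], p) equals
-- (final position, B's scan of the mapped moves, p + B's sum)
theorem main_inv (l : List (String × String × String)) (y x p : Int) (vs : List (Int × Int)) :
    l.foldl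
      (fun (st : Int × Int × List (Int × Int) × Int) t =>
        let y := st.1; let x := st.2.1; let vertices := st.2.2.1; let p := st.2.2.2
        let d := (PySem.Int.ofStr? t.2.1).getD 0
        let p := p + d
        let yx : Int × Int :=
          if t.1 == "R" then (y, x + d)
          else if t.1 == "D" then (y + d, x)
          else if t.1 == "L" then (y, x - d)
          else if t.1 == "U" then (y - d, x)
          else (y, x)
        (yx.1, yx.2, vertices ++ [yx], p))
      (y, x, vs ++ [(y, x)], p)
    = (let moves := l.map (fun t =>
          let dyx := PySem.Dict.getD pvDeltas t.1 (0, 0)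
          let d := (PySem.Int.ofStr? t.2.1).getD 0
          (dyx.1 * d, dyx.2 * d))
       ((pvPos moves (y, x)).1, (pvPos moves (y, x)).2,
        moves.foldl
          (fun (vs : List (Int × Int)) m =>
            let last := (PySem.List.pyGet? vs (-1)).getD (0, 0)
            vs ++ [(last.1 + m.1, last.2 + m.2)])
          (vs ++ [(y, x)]),
        p + (l.map (fun t => (PySem.Int.ofStr? t.2.1).getD 0)).sum)) := by
  induction l generalizing y x p vs with
  | nil => simp [pvPos]
  | cons t l ih =>
    simp only [List.foldl_cons, List.map_cons, List.sum_cons]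
    rw [step_delta]
    have hlast : PySem.List.pyGet? (vs ++ [(y, x)]) (-1) = some (y, x) :=
      PySem.List.pyGet?_neg_one_append_singleton _ _
    rw [hlast]
    have := ih (y + (PySem.Dict.getD pvDeltas t.1 (0, 0)).1 * ((PySem.Int.ofStr? t.2.1).getD 0))
      (x + (PySem.Dict.getD pvDeltas t.1 (0, 0)).2 * ((PySem.Int.ofStr? t.2.1).getD 0))
      (p + (PySem.Int.ofStr? t.2.1).getD 0) (vs ++ [(y, x)])
    simp only [List.append_assoc, List.singleton_append] at this ⊢
    rw [this]
    simp [pvPos]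
    ring

-- ===== VERDICT (by name: the statement is the Claim_ definition above) =====
theorem to_vertices_spec : Claim_equal_to_vertices := by
  intro dig_plan _ _
  unfold Spec_to_vertices to_vertices to_vertices_alt
  have := main_inv dig_plan 1 1 0 []
  simp only [List.nil_append] at this
  rw [this]
  simp
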